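-- pv_equiv track=rewrite | github.com/LeaveSHY/AdaptiveBFT-Supplement | scripts/run_safety_transfer_closure_attempt.py | first_error_signature
-- ===== SOURCE A (Python) =====
-- def first_error_signature(text: str) -> str:
--     for line in text.splitlines():
--         if "[ERROR]:" in line:
--             return line.strip()
--     for line in text.splitlines():
--         if "Could not prove or check" in line:
--             return line.strip()
--     for line in text.splitlines():
--         if "Semantic errors" in line or "Level error" in line:
--             return line.strip()
--     return "no explicit error signature found"
-- ===== SOURCE B (Python) =====
-- def first_error_signature(text: str) -> str:
--     err = prove = sem = None
--     for line in text.splitlines():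
--         if err is None and "[ERROR]:" in line:
--             err = line
--         if prove is None and "Could not prove or check" in line:
--             prove = line
--         if sem is None and ("Semantic errors" in line or "Level error" in line):
--             sem = line
--     for v in (err, prove, sem):
--         if v is not None:
--             return v.strip()
--     return "no explicit error signature found"
-- ===== Notes on version B (the rewrite author's own statement) =====
-- stated objective: alternative
-- what changed: Replaces A's three full passes over text.splitlines() with a single pass keeping three first-match accumulators and resolving the priority after the loop.
import Mathlib
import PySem

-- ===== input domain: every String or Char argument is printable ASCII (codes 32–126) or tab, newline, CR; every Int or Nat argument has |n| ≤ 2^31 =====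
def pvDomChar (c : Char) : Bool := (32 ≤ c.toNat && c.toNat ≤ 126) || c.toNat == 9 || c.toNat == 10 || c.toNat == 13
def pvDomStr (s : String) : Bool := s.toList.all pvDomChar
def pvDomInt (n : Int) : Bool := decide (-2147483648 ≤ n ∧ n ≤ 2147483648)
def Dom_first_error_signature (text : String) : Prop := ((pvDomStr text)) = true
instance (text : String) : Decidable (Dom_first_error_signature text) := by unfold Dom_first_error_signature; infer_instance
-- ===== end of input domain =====

-- B replaces A's three sequential passes over the lines by a single pass with
-- three first-match accumulators, resolving the priority after the loop.

-- the three line tests (shared literal conditions of both programs)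
def feC1 (l : String) : Bool := PySem.Str.isIn "[ERROR]:" l
def feC2 (l : String) : Bool := PySem.Str.isIn "Could not prove or check" l
def feC3 (l : String) : Bool := PySem.Str.isIn "Semantic errors" l || PySem.Str.isIn "Level error" l

-- ===== PORT A =====
def feLoop1 : List String → Option String
  | [] => none
  | l :: ls => if feC1 l then some (PySem.Str.strip l) else feLoop1 ls

def feLoop2 : List String → Option String
  | [] => none
  | l :: ls => if feC2 l then some (PySem.Str.strip l) else feLoop2 ls

def feLoop3 : List String → Option String
  | [] => none
  | l :: ls => if feC3 l then some (PySem.Str.strip l) else feLoop3 ls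

def first_error_signature (text : String) : String :=
  match feLoop1 (PySem.Str.splitlines text) with
  | some r => r
  | none =>
    match feLoop2 (PySem.Str.splitlines text) with
    | some r => r
    | none =>
      match feLoop3 (PySem.Str.splitlines text) with
      | some r => r
      | none => "no explicit error signature found"

-- ===== PORT B =====
def feStep (st : Option String × Option String × Option String) (line : String) :
    Option String × Option String × Option String :=
  let (e, p, s) := st
  ( if e.isNone && feC1 line then some line else e,
    if p.isNone && feC2 line then some line else p,
    if s.isNone && feC3 line then some line else s )

def first_error_signature_alt (text : String) : String :=
  match (PySem.Str.splitlines text).foldl feStep (none, none, none) with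
  | (some v, _, _) => PySem.Str.strip v
  | (none, some v, _) => PySem.Str.strip v
  | (none, none, some v) => PySem.Str.strip v
  | (none, none, none) => "no explicit error signature found"

-- ===== PRECONDITION & SPEC =====
def Spec_first_error_signature (text : String) (out : String) : Prop := out = first_error_signature_alt text
instance (text : String) (out : String) : Decidable (Spec_first_error_signature text out) := by unfold Spec_first_error_signature; infer_instance

-- ===== CLAIM (what is proved, stated in full; the proofs are below) =====
def Claim_equal_first_error_signature : Prop := ∀ (text : String), Dom_first_error_signature text → Spec_first_error_signature text (first_error_signature text)

-- ===== LEMMAS AND PROOFS =====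

-- componentwise view of B's one-pass fold
def feAcc (c : String → Bool) (a : Option String) (xs : List String) : Option String :=
  xs.foldl (fun a l => if a.isNone && c l then some l else a) a

theorem foldl_feStep_eq (xs : List String) : ∀ (e p s : Option String),
    xs.foldl feStep (e, p, s) = (feAcc feC1 e xs, feAcc feC2 p xs, feAcc feC3 s xs) := by
  induction xs with
  | nil => intro e p s; rfl
  | cons l ls ih =>
      intro e p s
      simp only [List.foldl_cons, feStep, feAcc] at *
      exact ih _ _ _

theorem feAcc_some (c : String → Bool) (v : String) (xs : List String) :
    xs.foldl (fun a l => if a.isNone && c l then some l else a) (some v) = some v := by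
  induction xs with
  | nil => rfl
  | cons l ls ih =>
      simp only [List.foldl_cons, Option.isNone_some, Bool.false_and, Bool.false_eq_true,
        if_false]
      exact ih

theorem feAcc_eq_loop (c : String → Bool) (loop : List String → Option String)
    (h0 : loop [] = none)
    (hc : ∀ l ls, loop (l :: ls) = if c l then some (PySem.Str.strip l) else loop ls)
    (xs : List String) :
    (feAcc c none xs).map PySem.Str.strip = loop xs := by
  induction xs with
  | nil => simp [feAcc, h0]
  | cons l ls ih =>
      rw [hc]
      cases hl : c l
      · simp only [Bool.false_eq_true, if_false]
        rw [← ih]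
        simp only [feAcc, List.foldl_cons, Option.isNone_none, Bool.true_and, hl,
          Bool.false_eq_true, if_false]
      · simp only [if_true]
        simp only [feAcc, List.foldl_cons, Option.isNone_none, Bool.true_and, hl, if_true]
        rw [feAcc_some]
        rfl

theorem feAcc_eq_loop1 (xs : List String) :
    (feAcc feC1 none xs).map PySem.Str.strip = feLoop1 xs :=
  feAcc_eq_loop feC1 feLoop1 rfl (fun _ _ => rfl) xs

theorem feAcc_eq_loop2 (xs : List String) :
    (feAcc feC2 none xs).map PySem.Str.strip = feLoop2 xs :=
  feAcc_eq_loop feC2 feLoop2 rfl (fun _ _ => rfl) xs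

theorem feAcc_eq_loop3 (xs : List String) :
    (feAcc feC3 none xs).map PySem.Str.strip = feLoop3 xs :=
  feAcc_eq_loop feC3 feLoop3 rfl (fun _ _ => rfl) xs

-- ===== VERDICT (by name: the statement is the Claim_ definition above) =====
theorem first_error_signature_spec : Claim_equal_first_error_signature := by
  intro text _
  unfold Spec_first_error_signature first_error_signature first_error_signature_alt
  rw [foldl_feStep_eq]
  rw [← feAcc_eq_loop1, ← feAcc_eq_loop2, ← feAcc_eq_loop3]
  rcases feAcc feC1 none (PySem.Str.splitlines text) with _ | v₁ <;>
  rcases feAcc feC2 none (PySem.Str.splitlines text) with _ | v₂ <;>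
  rcases feAcc feC3 none (PySem.Str.splitlines text) with _ | v₃ <;> rfl
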